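-- pv_equiv track=rewrite | github.com/Eric-xin/horizon_definitive | archive/v3.2.py | column_sequence
-- ===== SOURCE A (Python) =====
-- def column_sequence(c):
--     """Alternating columns around c within its sector block."""
--     block = (c // 7) * 7
--     rng = range(block + 1, block + 7) if c < 14 else range(block, block + 6)
--     seq = [c]
--     for i in range(1,7):
--         for nc in (c - i, c + i):
--             if nc in rng:
--                 seq.append(nc)
--     return seq
-- ===== SOURCE B (Python) =====
-- def column_sequence(c):
--     """Alternating columns around c within its sector block."""
--     block = (c // 7) * 7
--     rng = range(block + 1, block + 7) if c < 14 else range(block, block + 6)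
--     return [c] + sorted((x for x in rng if x != c), key=lambda x: (abs(x - c), x))
-- ===== Notes on version B (the rewrite author's own statement) =====
-- stated objective: simpler
-- what changed: The nested distance loop with an outward membership scan over the range is replaced by a single filter of the sector range plus one sort keyed by (distance to c, value), which reproduces the alternating low-then-high order.
import Mathlib
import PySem

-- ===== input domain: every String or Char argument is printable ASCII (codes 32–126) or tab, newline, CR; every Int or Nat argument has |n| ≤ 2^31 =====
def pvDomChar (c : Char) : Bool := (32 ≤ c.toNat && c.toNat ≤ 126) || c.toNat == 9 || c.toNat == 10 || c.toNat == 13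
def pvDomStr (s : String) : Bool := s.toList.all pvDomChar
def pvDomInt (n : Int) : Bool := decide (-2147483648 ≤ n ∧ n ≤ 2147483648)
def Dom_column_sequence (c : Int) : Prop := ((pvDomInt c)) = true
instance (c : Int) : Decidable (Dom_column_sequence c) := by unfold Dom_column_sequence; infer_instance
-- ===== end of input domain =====

-- B replaces A's nested distance loop + membership scan by one filter of the sector
-- range and a single sort keyed by (distance to c, value); objective: simpler.

-- ===== PORT A =====
def column_sequence (c : Int) : List Int :=
  let block := PySem.Int.floordiv c 7 * 7
  let rng := if c < 14 then PySem.List.pyRange (block + 1) (block + 7) else PySem.List.pyRange block (block + 6)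
  (PySem.List.pyRange 1 7).foldl
    (fun seq i => [c - i, c + i].foldl (fun seq nc => if nc ∈ rng then seq ++ [nc] else seq) seq)
    [c]

-- ===== PORT B =====
def column_sequence_alt (c : Int) : List Int :=
  let block := PySem.Int.floordiv c 7 * 7
  let rng := if c < 14 then PySem.List.pyRange (block + 1) (block + 7) else PySem.List.pyRange block (block + 6)
  c :: PySem.List.sorted2 (rng.filter (fun x => decide (x ≠ c))) (fun x => |x - c|) (fun x => x)

-- ===== PRECONDITION & SPEC =====
def Spec_column_sequence (c : Int) (out : List Int) : Prop := out = column_sequence_alt c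
instance (c : Int) (out : List Int) : Decidable (Spec_column_sequence c out) := by unfold Spec_column_sequence; infer_instance

-- ===== CLAIM (what is proved, stated in full; the proofs are below) =====
def Claim_equal_column_sequence : Prop := ∀ (c : Int), Dom_column_sequence c → Spec_column_sequence c (column_sequence c)

-- ===== LEMMAS AND PROOFS =====

-- shifting both endpoints of a step-1 range shifts its elements
theorem pyRange_shift (a b s : Int) :
    PySem.List.pyRange (a + s) (b + s) = (PySem.List.pyRange a b).map (· + s) := by
  rw [PySem.List.pyRange_of_pos _ _ (by norm_num), PySem.List.pyRange_of_pos _ _ (by norm_num)]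
  have hc : (if a + s < b + s then ((b + s - (a + s) + 1 - 1) / 1).toNat else 0)
      = (if a < b then ((b - a + 1 - 1) / 1).toNat else 0) := by
    by_cases h : a < b
    · rw [if_pos (by omega), if_pos h]; ring_nf
    · rw [if_neg (by omega), if_neg h]
  rw [hc, List.map_map]
  exact List.map_congr_left (fun k _ => by simp; ring)

theorem insertBy_map (s : Int) (before before' : Int → Int → Bool)
    (h : ∀ x y, before' (x + s) (y + s) = before x y) (x : Int) (ys : List Int) :
    PySem.List.insertBy before' (x + s) (ys.map (· + s))
      = (PySem.List.insertBy before x ys).map (· + s) := by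
  induction ys with
  | nil => simp [PySem.List.insertBy]
  | cons y ys ih =>
    simp only [List.map_cons, PySem.List.insertBy, h]
    by_cases hb : before x y
    · simp [hb]
    · simp [hb, ih]

theorem foldl_insertBy_map (s : Int) (before before' : Int → Int → Bool)
    (h : ∀ x y, before' (x + s) (y + s) = before x y) (xs acc : List Int) :
    (xs.map (· + s)).foldl (fun a x => PySem.List.insertBy before' x a) (acc.map (· + s))
      = (xs.foldl (fun a x => PySem.List.insertBy before x a) acc).map (· + s) := by
  induction xs generalizing acc with
  | nil => simp
  | cons x xs ih =>
    simp only [List.map_cons, List.foldl_cons]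
    rw [insertBy_map s before before' h x acc, ih]

theorem sorted2_shift (s c : Int) (xs : List Int) :
    PySem.List.sorted2 (xs.map (· + s)) (fun x => |x - (c + s)|) (fun x => x)
      = (PySem.List.sorted2 xs (fun x => |x - c|) (fun x => x)).map (· + s) := by
  show (xs.map (· + s)).foldl (fun a x => PySem.List.insertBy _ x a) []
      = ((xs.foldl (fun a x => PySem.List.insertBy _ x a) []).map (· + s))
  rw [show ([] : List Int) = ([] : List Int).map (· + s) from rfl]
  apply foldl_insertBy_map
  intro x y
  have hx : x + s - (c + s) = x - c := by ring
  have hy : y + s - (c + s) = y - c := by ring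
  simp [hx, hy]

-- outer-loop body of A, named so the induction below rewrites only the outer fold
def pvStepA (rng : List Int) (c : Int) (sq : List Int) (i : Int) : List Int :=
  [c - i, c + i].foldl (fun sq nc => if nc ∈ rng then sq ++ [nc] else sq) sq

-- the inner membership-and-append loop of A commutes with shifting by s
theorem A_fold_shift (l : List Int) (s c : Int) (rng rng' : List Int)
    (h : ∀ x, (x + s) ∈ rng' ↔ x ∈ rng) (seq : List Int) :
    l.foldl (pvStepA rng' (c + s)) (seq.map (· + s))
      = (l.foldl (pvStepA rng c) seq).map (· + s) := by
  induction l generalizing seq with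
  | nil => simp
  | cons i l ih =>
    have step : pvStepA rng' (c + s) (seq.map (· + s)) i = (pvStepA rng c seq i).map (· + s) := by
      unfold pvStepA
      have h1 : (c + s) - i = (c - i) + s := by ring
      have h2 : (c + s) + i = (c + i) + s := by ring
      simp only [List.foldl_cons, List.foldl_nil, h1, h2, h]
      by_cases m1 : (c - i) ∈ rng <;> by_cases m2 : (c + i) ∈ rng <;> simp [m1, m2]
    rw [List.foldl_cons, List.foldl_cons, step, ih]

theorem block_shift (c t : Int) :
    PySem.Int.floordiv (c + 7 * t) 7 * 7 = PySem.Int.floordiv c 7 * 7 + 7 * t := by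
  have : (c + 7 * t).fdiv 7 = c.fdiv 7 + t := by
    rw [show c + 7 * t = c + t * 7 by ring]
    exact Int.add_mul_fdiv_right c t (by norm_num)
  simp [PySem.Int.floordiv, this]; ring

theorem A_shift (c t : Int) (h : c < 14 ↔ c + 7 * t < 14) :
    column_sequence (c + 7 * t) = (column_sequence c).map (· + 7 * t) := by
  unfold column_sequence
  simp only [block_shift c t]
  set b := PySem.Int.floordiv c 7 * 7 with hb
  rw [show ([c + 7 * t] : List Int) = ([c] : List Int).map (· + 7 * t) by simp]
  by_cases hlt : c < 14
  · rw [if_pos hlt, if_pos (h.mp hlt)]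
    exact A_fold_shift _ _ _ _ _ (fun x => by simp only [PySem.List.mem_pyRange_one]; omega) _
  · rw [if_neg hlt, if_neg (fun hh => hlt (h.mpr hh))]
    exact A_fold_shift _ _ _ _ _ (fun x => by simp only [PySem.List.mem_pyRange_one]; omega) _

theorem B_shift (c t : Int) (h : c < 14 ↔ c + 7 * t < 14) :
    column_sequence_alt (c + 7 * t) = (column_sequence_alt c).map (· + 7 * t) := by
  unfold column_sequence_alt
  simp only [block_shift c t]
  set b := PySem.Int.floordiv c 7 * 7 with hb
  have hfilter : ∀ l : List Int,
      (l.map (· + 7 * t)).filter (fun x => decide (x ≠ c + 7 * t))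
        = (l.filter (fun x => decide (x ≠ c))).map (· + 7 * t) := by
    intro l
    rw [List.filter_map]
    congr 1
    apply List.filter_congr
    intro x _
    simp only [Function.comp]
    by_cases hx : x = c <;> simp [hx]
  by_cases hlt : c < 14
  · rw [if_pos hlt, if_pos (h.mp hlt),
      show b + 7 * t + 1 = (b + 1) + 7 * t by ring,
      show b + 7 * t + 7 = (b + 7) + 7 * t by ring,
      pyRange_shift, hfilter, sorted2_shift]
    simp
  · rw [if_neg hlt, if_neg (fun hh => hlt (h.mpr hh)),
      show b + 7 * t + 6 = (b + 6) + 7 * t by ring,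
      pyRange_shift, hfilter, sorted2_shift]
    simp

theorem base_cases : ∀ c0 : Int, (7 ≤ c0 ∧ c0 ≤ 20) →
    column_sequence c0 = column_sequence_alt c0 := by
  intro c0 h
  have : c0 = 7 ∨ c0 = 8 ∨ c0 = 9 ∨ c0 = 10 ∨ c0 = 11 ∨ c0 = 12 ∨ c0 = 13 ∨
      c0 = 14 ∨ c0 = 15 ∨ c0 = 16 ∨ c0 = 17 ∨ c0 = 18 ∨ c0 = 19 ∨ c0 = 20 := by omega
  rcases this with rfl|rfl|rfl|rfl|rfl|rfl|rfl|rfl|rfl|rfl|rfl|rfl|rfl|rfl <;> decide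

-- ===== VERDICT (by name: the statement is the Claim_ definition above) =====
theorem column_sequence_spec : Claim_equal_column_sequence := by
  intro c _
  unfold Spec_column_sequence
  have hmod := PySem.Int.floordiv_mul_add_mod c 7
  have hm0 : 0 ≤ PySem.Int.mod c 7 := PySem.Int.mod_nonneg c (by norm_num)
  have hm7 : PySem.Int.mod c 7 < 7 := PySem.Int.mod_lt c (by norm_num)
  by_cases hlt : c < 14
  · set c0 := PySem.Int.mod c 7 + 7 with hc0
    set t := PySem.Int.floordiv c 7 - 1 with ht
    have hc : c = c0 + 7 * t := by omega
    have hbr : c0 < 14 ↔ c0 + 7 * t < 14 := by omega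
    rw [hc, A_shift c0 t hbr, B_shift c0 t hbr, base_cases c0 (by omega)]
  · set c0 := PySem.Int.mod c 7 + 14 with hc0
    set t := PySem.Int.floordiv c 7 - 2 with ht
    have hc : c = c0 + 7 * t := by omega
    have hbr : c0 < 14 ↔ c0 + 7 * t < 14 := by omega
    rw [hc, A_shift c0 t hbr, B_shift c0 t hbr, base_cases c0 (by omega)]
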